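-- pv_equiv track=rewrite | github.com/joshanashakya/dissertation | workspace/dataset/java-python/GeeksForGeeks/1997/A/2.py | count_odd_pair
-- ===== SOURCE A (Python) =====
-- def count_odd_pair(n, a):
--     odd = 0
--     even = 0
--     for i in range(0,n):
--
--         # if number is even
--         if a[i] % 2==0:
--             even=even+1
--         # if number is odd
--         else:
--             odd=odd+1
--
--     # count of ordered pairs
--     ans = odd * (odd - 1)
--     return ans
-- ===== SOURCE B (Python) =====
-- def count_odd_pair(n, a):
--     # Naive pair enumeration: walk i over range(n); whenever a[i] is odd,
--     # count every earlier odd a[j] (j < i) twice (once per ordering).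
--     ans = 0
--     for i in range(0, n):
--         if a[i] % 2 != 0:
--             for j in range(0, i):
--                 if a[j] % 2 != 0:
--                     ans = ans + 2
--     return ans
-- ===== Notes on version B (the rewrite author's own statement) =====
-- stated objective: alternative
-- what changed: Replaces the count-then-closed-form computation odd*(odd-1) by a direct nested enumeration of index pairs: each pair of distinct odd positions is counted twice (once per ordering), with no odd/even counters and no closed-form formula.
import Mathlib
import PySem

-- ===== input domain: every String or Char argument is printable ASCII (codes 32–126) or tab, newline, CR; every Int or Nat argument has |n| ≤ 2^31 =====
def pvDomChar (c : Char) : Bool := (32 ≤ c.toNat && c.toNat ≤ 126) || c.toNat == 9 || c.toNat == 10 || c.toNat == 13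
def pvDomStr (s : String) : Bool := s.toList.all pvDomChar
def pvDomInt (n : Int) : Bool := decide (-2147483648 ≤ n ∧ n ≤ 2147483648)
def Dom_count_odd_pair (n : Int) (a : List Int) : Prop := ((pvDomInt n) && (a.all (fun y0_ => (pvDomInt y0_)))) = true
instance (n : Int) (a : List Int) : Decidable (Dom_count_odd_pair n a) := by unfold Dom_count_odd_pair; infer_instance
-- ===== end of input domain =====

-- B replaces A's count-odds-then-formula odd*(odd-1) by a direct nested enumeration
-- of index pairs (each unordered pair of odd positions counted twice): alternative algorithm, not faster.


-- ===== PORT A =====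
-- odd/even counters over range(0, n), then the closed form odd * (odd - 1)
def count_odd_pair (n : Int) (a : List Int) : Int :=
  let st := (PySem.List.pyRange 0 n).foldl
    (fun (oe : Int × Int) i =>
      if PySem.Int.mod (PySem.List.pyGetD a i 0) 2 = 0 then (oe.1, oe.2 + 1)
      else (oe.1 + 1, oe.2)) (0, 0)
  st.1 * (st.1 - 1)

-- ===== PORT B =====
-- nested enumeration: for each odd position i, add 2 for every odd position j < i
def count_odd_pair_alt (n : Int) (a : List Int) : Int :=
  (PySem.List.pyRange 0 n).foldl
    (fun ans i =>
      if PySem.Int.mod (PySem.List.pyGetD a i 0) 2 ≠ 0 then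
        (PySem.List.pyRange 0 i).foldl
          (fun acc j => if PySem.Int.mod (PySem.List.pyGetD a j 0) 2 ≠ 0 then acc + 2 else acc)
          ans
      else ans) 0

-- ===== PRECONDITION & SPEC =====
-- Pre_ excludes exactly the inputs where the Python A (and B) raise IndexError: n beyond len(a).
def Pre_count_odd_pair (n : Int) (a : List Int) : Prop := n ≤ (a.length : Int)
instance (n : Int) (a : List Int) : Decidable (Pre_count_odd_pair n a) := by unfold Pre_count_odd_pair; infer_instance
def pvWitness_count_odd_pair : Int × List Int := (3, [1, 2, 5])

def Spec_count_odd_pair (n : Int) (a : List Int) (out : Int) : Prop := out = count_odd_pair_alt n a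
instance (n : Int) (a : List Int) (out : Int) : Decidable (Spec_count_odd_pair n a out) := by unfold Spec_count_odd_pair; infer_instance

-- ===== CLAIM (what is proved, stated in full; the proofs are below) =====
def Claim_equal_count_odd_pair : Prop := ∀ (n : Int) (a : List Int), Dom_count_odd_pair n a → Pre_count_odd_pair n a → Spec_count_odd_pair n a (count_odd_pair n a)

-- ===== LEMMAS AND PROOFS =====

-- number of odd entries among positions 0..m-1 (as read by the ports)
def oddc (a : List Int) (m : Nat) : Int :=
  ((List.range m).countP (fun k : Nat => PySem.Int.mod (PySem.List.pyGetD a (k : Int) 0) 2 != 0) : Int)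

lemma oddc_succ (a : List Int) (m : Nat) :
    oddc a (m + 1) =
      oddc a m + (if PySem.Int.mod (PySem.List.pyGetD a (m : Int) 0) 2 ≠ 0 then 1 else 0) := by
  unfold oddc
  rw [List.range_succ, List.countP_append]
  split_ifs with h
  · simp only [List.countP_cons, List.countP_nil, bne_iff_ne, ne_eq, h, not_false_eq_true,
      decide_true]
    push_cast; ring
  · simp only [List.countP_cons, List.countP_nil, bne_iff_ne, ne_eq, h, decide_false]
    push_cast; ring

lemma foldA (a : List Int) (m : Nat) (x y : Int) :
    ((List.range m).map (fun k : Nat => (k : Int))).foldl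
      (fun (oe : Int × Int) i =>
        if PySem.Int.mod (PySem.List.pyGetD a i 0) 2 = 0 then (oe.1, oe.2 + 1)
        else (oe.1 + 1, oe.2)) (x, y)
    = (x + oddc a m, y + ((m : Int) - oddc a m)) := by
  induction m generalizing x y with
  | zero => simp [oddc]
  | succ m ih =>
    rw [List.range_succ, List.map_append, List.foldl_append, ih, oddc_succ]
    simp only [List.map_cons, List.map_nil, List.foldl_cons, List.foldl_nil]
    by_cases h : PySem.Int.mod (PySem.List.pyGetD a (m : Int) 0) 2 = 0
    · rw [if_pos h, if_neg (by simpa using h)]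
      simp only [Prod.mk.injEq]; constructor <;> (push_cast; ring)
    · rw [if_neg h, if_pos h]
      simp only [Prod.mk.injEq]; constructor <;> (push_cast; ring)

lemma foldInner (a : List Int) (m : Nat) (x : Int) :
    ((List.range m).map (fun k : Nat => (k : Int))).foldl
      (fun acc j => if PySem.Int.mod (PySem.List.pyGetD a j 0) 2 ≠ 0 then acc + 2 else acc) x
    = x + 2 * oddc a m := by
  induction m generalizing x with
  | zero => simp [oddc]
  | succ m ih =>
    rw [List.range_succ, List.map_append, List.foldl_append, ih, oddc_succ]
    simp only [List.map_cons, List.map_nil, List.foldl_cons, List.foldl_nil]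
    split_ifs <;> ring

lemma foldB (a : List Int) (m : Nat) (x : Int) :
    ((List.range m).map (fun k : Nat => (k : Int))).foldl
      (fun ans i =>
        if PySem.Int.mod (PySem.List.pyGetD a i 0) 2 ≠ 0 then
          (PySem.List.pyRange 0 i).foldl
            (fun acc j => if PySem.Int.mod (PySem.List.pyGetD a j 0) 2 ≠ 0 then acc + 2 else acc)
            ans
        else ans) x
    = x + oddc a m * (oddc a m - 1) := by
  induction m generalizing x with
  | zero => simp [oddc]
  | succ m ih =>
    rw [List.range_succ, List.map_append, List.foldl_append, ih, oddc_succ]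
    simp only [List.map_cons, List.map_nil, List.foldl_cons, List.foldl_nil]
    split_ifs with h
    · rw [PySem.List.pyRange_zero_natCast, foldInner]
      ring
    · ring

lemma pyRange_zero_nonpos {n : Int} (h : n ≤ 0) : PySem.List.pyRange 0 n = [] := by
  simp [PySem.List.pyRange, show ¬ (0:Int) < n by omega]

lemma ports_agree (n : Int) (a : List Int) : count_odd_pair n a = count_odd_pair_alt n a := by
  unfold count_odd_pair count_odd_pair_alt
  by_cases h : 0 ≤ n
  · have hn : n = ((n.toNat : Nat) : Int) := by omega
    rw [hn, PySem.List.pyRange_zero_natCast]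
    simp only [foldA, foldB]
    ring
  · rw [pyRange_zero_nonpos (by omega)]
    simp

-- ===== VERDICT (by name: the statement is the Claim_ definition above) =====
theorem count_odd_pair_spec : Claim_equal_count_odd_pair := by
  intro n a _ _
  unfold Spec_count_odd_pair
  exact ports_agree n a
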